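-- pv_equiv track=rewrite | github.com/davidbenjamin/permutect | permutect/data/read_set.py | bases_as_base5_int
-- ===== SOURCE A (Python) =====
-- def bases_as_base5_int(bases: str) -> int:
--     power_of_5 = 1
--     bases_to_use = bases if len(bases) < 14 else bases[:13]
--     result = 0
--     for nuc in bases_to_use:
--         coeff = 1 if nuc == 'A' else (2 if nuc == 'C' else (3 if nuc == 'G' else 4))
--         result += power_of_5 * coeff
--         power_of_5 *= 5
--     return result
-- ===== SOURCE B (Python) =====
-- def bases_as_base5_int(bases: str) -> int:
--     coeff = {'A': 1, 'C': 2, 'G': 3}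
--     result = 0
--     for nuc in reversed(bases[:13]):
--         result = result * 5 + coeff.get(nuc, 4)
--     return result
-- ===== Notes on version B (the rewrite author's own statement) =====
-- stated objective: simpler
-- what changed: Replaces the power-of-5 accumulator plus running sum with Horner's method over the reversed truncated string (result = result*5 + coeff), with the coeff if-chain replaced by a dict lookup with default 4.
import Mathlib
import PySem

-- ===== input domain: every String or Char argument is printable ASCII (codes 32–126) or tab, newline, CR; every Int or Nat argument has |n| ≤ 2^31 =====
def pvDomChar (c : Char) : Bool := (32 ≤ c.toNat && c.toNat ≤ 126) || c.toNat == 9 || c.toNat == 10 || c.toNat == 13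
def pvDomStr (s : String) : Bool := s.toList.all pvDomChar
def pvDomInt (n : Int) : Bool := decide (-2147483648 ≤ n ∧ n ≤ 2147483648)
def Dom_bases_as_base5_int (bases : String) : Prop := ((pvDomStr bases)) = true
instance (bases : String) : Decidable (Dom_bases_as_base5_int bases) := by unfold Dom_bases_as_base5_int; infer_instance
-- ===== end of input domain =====

-- B replaces the power-of-5 accumulator with Horner's method over the reversed truncated string (simpler decomposition; same return value).


-- ===== PORT A =====
def bases_as_base5_int (bases : String) : Int :=
  let bases_to_use : List Char :=
    if PySem.Str.len bases < 14 then bases.toList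
    else PySem.List.slice bases.toList none (some 13)
  let st : Int × Int := bases_to_use.foldl
    (fun (st : Int × Int) nuc =>
      let coeff : Int := if nuc = 'A' then 1 else (if nuc = 'C' then 2 else (if nuc = 'G' then 3 else 4))
      (st.1 * 5, st.2 + st.1 * coeff))
    (1, 0)
  st.2

-- ===== PORT B =====
def bases_as_base5_int_alt (bases : String) : Int :=
  (PySem.List.slice bases.toList none (some 13)).reverse.foldl
    (fun result nuc => result * 5 + PySem.Dict.getD (PySem.Dict.ofList [('A', (1 : Int)), ('C', 2), ('G', 3)]) nuc 4)
    0

-- ===== PRECONDITION & SPEC =====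
def Spec_bases_as_base5_int (bases : String) (out : Int) : Prop := out = bases_as_base5_int_alt bases
instance (bases : String) (out : Int) : Decidable (Spec_bases_as_base5_int bases out) := by unfold Spec_bases_as_base5_int; infer_instance

-- ===== CLAIM (what is proved, stated in full; the proofs are below) =====
def Claim_equal_bases_as_base5_int : Prop := ∀ (bases : String), Dom_bases_as_base5_int bases → Spec_bases_as_base5_int bases (bases_as_base5_int bases)

-- ===== LEMMAS AND PROOFS =====

def pvCoeffA (nuc : Char) : Int :=
  if nuc = 'A' then 1 else (if nuc = 'C' then 2 else (if nuc = 'G' then 3 else 4))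

theorem pvCoeff_eq (nuc : Char) :
    PySem.Dict.getD (PySem.Dict.ofList [('A', (1 : Int)), ('C', 2), ('G', 3)]) nuc 4 = pvCoeffA nuc := by
  have hmk : PySem.Dict.ofList [('A', (1 : Int)), ('C', 2), ('G', 3)]
      = PySem.Dict.mk [('A', (1 : Int)), ('C', 2), ('G', 3)] := by decide
  rw [hmk]
  by_cases hA : nuc = 'A'
  · subst hA; decide
  by_cases hC : nuc = 'C'
  · subst hC; decide
  by_cases hG : nuc = 'G'
  · subst hG; decide
  simp [PySem.Dict.getD, PySem.Dict.get?, pvCoeffA,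
    Ne.symm hA, Ne.symm hC, Ne.symm hG, hA, hC, hG]

theorem pvHorner_eq (l : List Char) : ∀ (p r : Int),
    (l.foldl (fun (st : Int × Int) nuc => (st.1 * 5, st.2 + st.1 * pvCoeffA nuc)) (p, r)).2
      = r + p * (l.reverse.foldl (fun result nuc => result * 5 + pvCoeffA nuc) 0) := by
  induction l with
  | nil => intro p r; simp
  | cons c t ih =>
      intro p r
      simp only [List.foldl_cons, List.reverse_cons, List.foldl_append, List.foldl_cons,
        List.foldl_nil, ih]
      ring

-- ===== VERDICT (by name: the statement is the Claim_ definition above) =====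
theorem bases_as_base5_int_spec : Claim_equal_bases_as_base5_int := by
  intro bases _
  unfold Spec_bases_as_base5_int bases_as_base5_int bases_as_base5_int_alt
  have hslice : PySem.List.slice bases.toList none (some 13) = bases.toList.take 13 := by
    simpa using PySem.List.slice_to_natCast (xs := bases.toList) (b := 13)
  have htrunc :
      (if PySem.Str.len bases < 14 then bases.toList
       else PySem.List.slice bases.toList none (some 13)) = bases.toList.take 13 := by
    rw [hslice]
    split_ifs with h
    · rw [List.take_of_length_le]
      have : PySem.Str.len bases = (bases.toList.length : Int) := by
        simp [PySem.Str.len]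
      omega
    · rfl
  rw [htrunc, hslice]
  simp only [show (fun (st : Int × Int) nuc =>
      (st.1 * 5, st.2 + st.1 * (if nuc = 'A' then (1:Int) else (if nuc = 'C' then 2 else (if nuc = 'G' then 3 else 4))))) =
      (fun (st : Int × Int) nuc => (st.1 * 5, st.2 + st.1 * pvCoeffA nuc)) from by
        funext st nuc; simp [pvCoeffA]]
  simp only [show (fun (result : Int) nuc =>
      result * 5 + PySem.Dict.getD (PySem.Dict.ofList [('A', (1 : Int)), ('C', 2), ('G', 3)]) nuc 4) =
      (fun (result : Int) nuc => result * 5 + pvCoeffA nuc) from by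
        funext result nuc; rw [pvCoeff_eq]]
  rw [pvHorner_eq]
  ring
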